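-- pv_equiv track=rewrite | github.com/Akua-Serwaa-Nkrumah/CompetitiveProgramming-master | CompetitiveProgramming-master/.cph/Codeforces/ChallengingValleys.py | Valley
-- ===== SOURCE A (Python) =====
-- def Valley(arr):
--         min_element = min(arr)
--         min_position = arr.index(min_element)
--         # print (min_element, min_position)
--
--         for i in range(min_position):
--             if arr[i] < arr[i+1]:
--                 return False
--         for  j in range(min_position,len(arr)-1):
--             if arr[j] > arr[j+1]:
--                 return False
--
--         return True
-- ===== SOURCE B (Python) =====
-- def Valley(arr):
--     m = min(arr)
--     seen_min = False
--     prev = arr[0]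
--     for x in arr[1:]:
--         seen_min = seen_min or prev == m
--         if seen_min:
--             if x < prev:
--                 return False
--         else:
--             if x > prev:
--                 return False
--         prev = x
--     return True
-- ===== Notes on version B (the rewrite author's own statement) =====
-- stated objective: simpler
-- what changed: B replaces A's arr.index lookup and two index-based range scans by a single forward pass over consecutive pairs that flips a seen_min flag at the first occurrence of the minimum.
import Mathlib
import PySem

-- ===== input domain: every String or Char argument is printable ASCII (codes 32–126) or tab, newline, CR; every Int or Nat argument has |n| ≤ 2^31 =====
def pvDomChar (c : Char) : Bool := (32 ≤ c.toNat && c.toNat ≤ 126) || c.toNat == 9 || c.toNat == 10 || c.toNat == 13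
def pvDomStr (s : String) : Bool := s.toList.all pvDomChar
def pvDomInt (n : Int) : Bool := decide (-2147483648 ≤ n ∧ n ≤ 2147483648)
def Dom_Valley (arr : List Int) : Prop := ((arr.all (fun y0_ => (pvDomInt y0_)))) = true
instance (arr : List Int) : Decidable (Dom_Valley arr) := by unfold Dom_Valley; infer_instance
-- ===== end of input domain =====

-- B replaces A's arr.index and two bounded index scans by one forward pass over
-- consecutive pairs with a seen_min flag (objective: simpler, one pass).

-- ===== PORT A =====
-- Port of A: min, first index of min, then two index-range scans (early return = all).
-- pyGetD with default 0: every index used is in range (i+1 ≤ p < len, j+1 ≤ len-1).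
def Valley (arr : List Int) : Bool :=
  match PySem.List.min? arr (fun x => x) with
  | none => false   -- Python: min([]) raises ValueError; excluded by Pre_Valley
  | some m =>
    let p : Nat := (PySem.List.index? arr m).getD 0
    ((PySem.List.pyRange 0 (p : Int) 1).all (fun i =>
        !(decide (PySem.List.pyGetD arr i 0 < PySem.List.pyGetD arr (i+1) 0)))) &&
    ((PySem.List.pyRange (p : Int) ((arr.length : Int) - 1) 1).all (fun j =>
        !(decide (PySem.List.pyGetD arr j 0 > PySem.List.pyGetD arr (j+1) 0))))

-- ===== PORT B =====
-- B's loop: carry prev and the seen_min flag along the tail of the list.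
def ValleyAltLoop (m prev : Int) (seen : Bool) : List Int → Bool
  | [] => true
  | x :: xs =>
    let seen' := seen || (prev == m)
    if seen' then
      if x < prev then false else ValleyAltLoop m x seen' xs
    else
      if x > prev then false else ValleyAltLoop m x seen' xs

def Valley_alt (arr : List Int) : Bool :=
  match PySem.List.min? arr (fun x => x) with
  | none => false   -- Python: min([]) raises ValueError; excluded by Pre_Valley
  | some m =>
    match arr with
    | [] => false   -- unreachable: min? = some means arr ≠ []
    | a :: rest => ValleyAltLoop m a false rest

-- ===== PRECONDITION & SPEC =====
-- A raises ValueError on the empty list (min([])); both ports return a dummy there.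
def Pre_Valley (arr : List Int) : Prop := arr ≠ []
instance (arr : List Int) : Decidable (Pre_Valley arr) := by unfold Pre_Valley; infer_instance
def pvWitness_Valley : List Int := ([3, 1, 1, 2])

def Spec_Valley (arr : List Int) (out : Bool) : Prop := out = Valley_alt arr
instance (arr : List Int) (out : Bool) : Decidable (Spec_Valley arr out) := by unfold Spec_Valley; infer_instance

-- ===== CLAIM (what is proved, stated in full; the proofs are below) =====
def Claim_equal_Valley : Prop := ∀ (arr : List Int), Dom_Valley arr → Pre_Valley arr → Spec_Valley arr (Valley arr)

-- ===== LEMMAS AND PROOFS =====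

-- chain checks used as the common normal form of both programs
def nonIncL : List Int → Bool
  | [] => true
  | [_] => true
  | x :: y :: r => !(decide (x < y)) && nonIncL (y :: r)

def nonDecL : List Int → Bool
  | [] => true
  | [_] => true
  | x :: y :: r => !(decide (x > y)) && nonDecL (y :: r)

theorem idxOf?_eq_some_idxOf (m : Int) (arr : List Int) (h : m ∈ arr) :
    List.idxOf? m arr = some (arr.idxOf m) := by
  induction arr with
  | nil => simp at h
  | cons a t ih =>
    by_cases ham : a = m
    · simp [List.idxOf?_cons, ham]
    · have hm : m ∈ t := (List.mem_cons.mp h).resolve_left (fun he => ham he.symm)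
      simp [List.idxOf?_cons, ham, ih hm]

theorem loop1_eq (arr : List Int) : ∀ (k q : Nat), q + k < arr.length →
    (PySem.List.pyRange (q : Int) ((q + k : Nat) : Int) 1).all (fun i =>
        !(decide (PySem.List.pyGetD arr i 0 < PySem.List.pyGetD arr (i+1) 0)))
      = nonIncL ((arr.drop q).take (k + 1)) := by
  intro k
  induction k with
  | zero =>
    intro q hq
    rw [PySem.List.pyRange_one_eq_nil (by push_cast; omega)]
    have hd : arr.drop q = arr[q] :: arr.drop (q + 1) :=
      List.drop_eq_getElem_cons (by omega)
    rw [hd, List.take_succ_cons, List.take_zero]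
    rfl
  | succ k ih =>
    intro q hq
    have h1 : q + 1 < arr.length := by omega
    have h0 : q < arr.length := by omega
    rw [PySem.List.pyRange_one_cons (by push_cast; omega)]
    have hstep : ((q : Int) + 1) = ((q + 1 : Nat) : Int) := by push_cast; ring
    have hub : ((q + (k + 1) : Nat) : Int) = (((q + 1) + k : Nat) : Int) := by push_cast; ring
    rw [List.all_cons, hstep, hub, ih (q + 1) (by omega)]
    have g0 : PySem.List.pyGetD arr ((q : Nat) : Int) 0 = arr[q] :=
      PySem.List.pyGetD_ofNat arr q 0 h0
    have g1 : PySem.List.pyGetD arr (((q + 1 : Nat)) : Int) 0 = arr[q + 1] :=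
      PySem.List.pyGetD_ofNat arr (q+1) 0 h1
    have hd : arr.drop q = arr[q] :: arr.drop (q + 1) :=
      List.drop_eq_getElem_cons (by omega)
    have hd1 : arr.drop (q + 1) = arr[q + 1] :: arr.drop (q + 2) :=
      List.drop_eq_getElem_cons (by omega)
    rw [g0, g1, hd, List.take_succ_cons, hd1, List.take_succ_cons]
    simp [nonIncL]

theorem loop2_eq (arr : List Int) : ∀ (k q : Nat), q + k + 1 = arr.length →
    (PySem.List.pyRange (q : Int) ((arr.length : Int) - 1) 1).all (fun j =>
        !(decide (PySem.List.pyGetD arr j 0 > PySem.List.pyGetD arr (j+1) 0)))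
      = nonDecL (arr.drop q) := by
  intro k
  induction k with
  | zero =>
    intro q hq
    rw [PySem.List.pyRange_one_eq_nil (by omega)]
    have hd : arr.drop q = arr[q] :: arr.drop (q + 1) :=
      List.drop_eq_getElem_cons (by omega)
    have hnil : arr.drop (q + 1) = [] := List.drop_eq_nil_of_le (by omega)
    simp [hd, hnil, nonDecL]
  | succ k ih =>
    intro q hq
    have h1 : q + 1 < arr.length := by omega
    have h0 : q < arr.length := by omega
    rw [PySem.List.pyRange_one_cons (by omega)]
    have hstep : ((q : Int) + 1) = ((q + 1 : Nat) : Int) := by push_cast; ring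
    rw [List.all_cons, hstep, ih (q + 1) (by omega)]
    have g0 : PySem.List.pyGetD arr ((q : Nat) : Int) 0 = arr[q] :=
      PySem.List.pyGetD_ofNat arr q 0 h0
    have g1 : PySem.List.pyGetD arr (((q + 1 : Nat)) : Int) 0 = arr[q + 1] :=
      PySem.List.pyGetD_ofNat arr (q+1) 0 h1
    have hd : arr.drop q = arr[q] :: arr.drop (q + 1) :=
      List.drop_eq_getElem_cons (by omega)
    have hd1 : arr.drop (q + 1) = arr[q + 1] :: arr.drop (q + 2) :=
      List.drop_eq_getElem_cons (by omega)
    rw [g0, g1, hd, hd1]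
    simp [nonDecL]

theorem loopB_seen (m : Int) : ∀ (xs : List Int) (prev : Int),
    ValleyAltLoop m prev true xs = nonDecL (prev :: xs) := by
  intro xs
  induction xs with
  | nil => intro prev; simp [ValleyAltLoop, nonDecL]
  | cons x xs ih =>
    intro prev
    by_cases h : x < prev
    · simp [ValleyAltLoop, nonDecL, h]
    · simp [ValleyAltLoop, nonDecL, h, ih]

theorem loopB_eq (m : Int) : ∀ (t : List Int) (a : Int), m ∈ a :: t →
    ValleyAltLoop m a false t
      = (nonIncL (((a :: t)).take ((a :: t).idxOf m + 1))
         && nonDecL ((a :: t).drop ((a :: t).idxOf m))) := by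
  intro t
  induction t with
  | nil =>
    intro a h
    have : a = m := (List.mem_singleton.mp h).symm
    simp [this, ValleyAltLoop, nonIncL, nonDecL]
  | cons x xs ih =>
    intro a h
    by_cases ham : a = m
    · subst ham
      have hidx : (a :: x :: xs).idxOf a = 0 := by simp
      by_cases hlt : x < a
      · simp [ValleyAltLoop, hidx, nonIncL, nonDecL, hlt]
      · simp only [ValleyAltLoop, hidx]
        simp [hlt, loopB_seen, nonIncL, nonDecL]
    · have hm : m ∈ x :: xs := (List.mem_cons.mp h).resolve_left (fun he => ham he.symm)
      have hidx : (a :: x :: xs).idxOf m = (x :: xs).idxOf m + 1 := by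
        simp [List.idxOf_cons, ham]
      have htk : (a :: x :: xs).take ((a :: x :: xs).idxOf m + 1)
          = a :: (x :: xs).take ((x :: xs).idxOf m + 1) := by rw [hidx]; rfl
      have htk2 : (x :: xs).take ((x :: xs).idxOf m + 1)
          = x :: xs.take ((x :: xs).idxOf m) := by rfl
      by_cases hgt : x > a
      · rw [htk, htk2]
        simp [ValleyAltLoop, ham, hgt, nonIncL]
      · have hdr : (a :: x :: xs).drop ((a :: x :: xs).idxOf m)
            = (x :: xs).drop ((x :: xs).idxOf m) := by rw [hidx]; rfl
        rw [htk, hdr, htk2]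
        have hbe : (a == m) = false := by simp [ham]
        have lhs : ValleyAltLoop m a false (x :: xs) = ValleyAltLoop m x false xs := by
          simp [ValleyAltLoop, hbe, hgt]
        rw [lhs, ih x hm, htk2]
        have hred : nonIncL (a :: x :: xs.take ((x :: xs).idxOf m))
            = nonIncL (x :: xs.take ((x :: xs).idxOf m)) := by
          simp [nonIncL, show ¬ (a < x) from hgt]
        rw [hred]

-- ===== VERDICT (by name: the statement is the Claim_ definition above) =====
theorem Valley_spec : Claim_equal_Valley := by
  intro arr _ hpre
  unfold Spec_Valley
  cases hmin : PySem.List.min? arr (fun x => x) with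
  | none => exact absurd ((PySem.List.min?_eq_none_iff arr _).mp hmin) hpre
  | some m =>
    have hmem : m ∈ arr := PySem.List.min?_mem hmin
    have hidx : PySem.List.index? arr m = some (arr.idxOf m) := by
      rw [PySem.List.index?_eq_idxOf?]; exact idxOf?_eq_some_idxOf m arr hmem
    have hlt : arr.idxOf m < arr.length := List.idxOf_lt_length_of_mem hmem
    cases arr with
    | nil => exact absurd rfl hpre
    | cons a t =>
      simp only [Valley, Valley_alt, hmin, hidx, Option.getD_some]
      rw [loopB_eq m t a hmem]
      have e1 := loop1_eq (a :: t) ((a :: t).idxOf m) 0 (by simpa using hlt)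
      have e2 := loop2_eq (a :: t) ((a :: t).length - 1 - (a :: t).idxOf m)
        ((a :: t).idxOf m) (by simp at hlt ⊢; omega)
      simp only [Nat.zero_add, Nat.cast_zero, List.drop_zero] at e1
      rw [e1, e2]
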